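-- pv_equiv track=rewrite | github.com/eliottcassidy2000/math | 04-computation/h21_component_proof.py | exhaustive_component_check
-- ===== SOURCE A (Python) =====
-- def exhaustive_component_check(n):
--     """Check if I(C,2)=21 ever appears as a component value."""
--     edges = [(i, j) for i in range(n) for j in range(i+1, n)]
--     m = len(edges)
--     component_vals = set()
--
--     for bits in range(1 << m):
--         A = [[0]*n for _ in range(n)]
--         for k, (i, j) in enumerate(edges):
--             if bits & (1 << k):
--                 A[j][i] = 1
--             else:
--                 A[i][j] = 1
--
--         # Find 3-cycles
--         cycles = []
--         for a in range(n):
--             for b in range(a+1, n):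
--                 for c in range(b+1, n):
--                     if (A[a][b] and A[b][c] and A[c][a]) or \
--                        (A[a][c] and A[c][b] and A[b][a]):
--                         cycles.append(frozenset({a, b, c}))
--
--         if not cycles:
--             continue
--
--         nc = len(cycles)
--         omega_adj = [set() for _ in range(nc)]
--         for i in range(nc):
--             for j in range(i+1, nc):
--                 if cycles[i] & cycles[j]:
--                     omega_adj[i].add(j)
--                     omega_adj[j].add(i)
--
--         visited = [False]*nc
--         for start in range(nc):
--             if visited[start]:
--                 continue
--             comp = []
--             queue = [start]
--             visited[start] = True
--             while queue:
--                 v = queue.pop()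
--                 comp.append(v)
--                 for u in omega_adj[v]:
--                     if not visited[u]:
--                         visited[u] = True
--                         queue.append(u)
--
--             sz = len(comp)
--             I_val = 0
--             for mask in range(1 << sz):
--                 nodes = [comp[i] for i in range(sz) if mask & (1 << i)]
--                 independent = True
--                 for i in range(len(nodes)):
--                     for j in range(i+1, len(nodes)):
--                         if nodes[j] in omega_adj[nodes[i]]:
--                             independent = False
--                             break
--                     if not independent:
--                         break
--                 if independent:
--                     I_val += 2**bin(mask).count('1')
--
--             component_vals.add(I_val)
--
--     return sorted(component_vals)
-- ===== SOURCE B (Python) =====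
-- def exhaustive_component_check(n):
--     """Check if I(C,2)=21 ever appears as a component value."""
--     edges = [(i, j) for i in range(n) for j in range(i+1, n)]
--     m = len(edges)
--     vals = []
--
--     for bits in range(1 << m):
--         # store the orientation as a set of directed arcs instead of an n x n matrix
--         arcs = set()
--         for k, (i, j) in enumerate(edges):
--             if bits & (1 << k):
--                 arcs.add((j, i))
--             else:
--                 arcs.add((i, j))
--
--         cycles = []
--         for a in range(n):
--             for b in range(a+1, n):
--                 for c in range(b+1, n):
--                     if ((a, b) in arcs and (b, c) in arcs and (c, a) in arcs) or \
--                        ((a, c) in arcs and (c, b) in arcs and (b, a) in arcs):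
--                         cycles.append(frozenset({a, b, c}))
--
--         if not cycles:
--             continue
--
--         nc = len(cycles)
--         omega_adj = [set() for _ in range(nc)]
--         for i in range(nc):
--             for j in range(i+1, nc):
--                 if cycles[i] & cycles[j]:
--                     omega_adj[i].add(j)
--                     omega_adj[j].add(i)
--
--         def ind(vs):
--             # deletion-contraction for the independence polynomial at x = 2
--             if not vs:
--                 return 1
--             v, rest = vs[0], vs[1:]
--             return ind(rest) + 2 * ind([u for u in rest if u not in omega_adj[v]])
--
--         visited = [False]*nc
--         for start in range(nc):
--             if visited[start]:
--                 continue
--             comp = []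
--             queue = [start]
--             visited[start] = True
--             while queue:
--                 v = queue.pop()
--                 comp.append(v)
--                 for u in omega_adj[v]:
--                     if not visited[u]:
--                         visited[u] = True
--                         queue.append(u)
--
--             vals.append(ind(comp))
--
--     return sorted(set(vals))
-- ===== Notes on version B (the rewrite author's own statement) =====
-- stated objective: faster
-- what changed: B stores each orientation as a set of directed arcs instead of building an n-by-n adjacency matrix, and replaces the O(2^sz * sz^2) subset-mask enumeration of each component's independence sum with the deletion-contraction recursion ind(S) = ind(S-v) + 2*ind(S - N[v]) for the independence polynomial at x = 2.
import Mathlib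
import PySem

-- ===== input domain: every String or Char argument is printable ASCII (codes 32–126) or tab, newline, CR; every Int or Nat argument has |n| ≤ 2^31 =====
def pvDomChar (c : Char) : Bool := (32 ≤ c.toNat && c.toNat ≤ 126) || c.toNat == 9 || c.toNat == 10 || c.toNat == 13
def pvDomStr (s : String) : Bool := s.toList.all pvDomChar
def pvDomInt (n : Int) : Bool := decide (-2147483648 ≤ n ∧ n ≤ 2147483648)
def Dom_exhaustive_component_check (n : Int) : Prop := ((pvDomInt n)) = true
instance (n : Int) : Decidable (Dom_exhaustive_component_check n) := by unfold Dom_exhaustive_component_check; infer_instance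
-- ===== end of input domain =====

-- B stores each orientation as a set of directed arcs instead of an n×n matrix and computes each
-- component's independence sum by deletion–contraction instead of enumerating all 2^sz subsets.

-- ===== PORT A =====
-- shared helper: the edge list [(i, j) for i in range(n) for j in range(i+1, n)] (identical line in A and B)
def pvEdges (n : Int) : List (Int × Int) :=
  (PySem.List.pyRange 0 n 1).flatMap (fun i => (PySem.List.pyRange (i+1) n 1).map (fun j => (i, j)))

-- shared helper: frozenset({a,b,c}) with a<b<c is kept as the ordered triple; `&`-nonempty test of two such triples
def pvTripInter (s t : Int × Int × Int) : Bool :=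
  s.1 == t.1 || s.1 == t.2.1 || s.1 == t.2.2 ||
  s.2.1 == t.1 || s.2.1 == t.2.1 || s.2.1 == t.2.2 ||
  s.2.2 == t.1 || s.2.2 == t.2.1 || s.2.2 == t.2.2

-- shared helper: `u in omega_adj[v]` for in-range cycle indices (both programs build omega_adj by the
-- same double loop: i ≠ j are adjacent iff their triangles share a vertex)
def pvOmegaAdj (cycles : List (Int × Int × Int)) (v u : Int) : Bool :=
  decide (v ≠ u) && pvTripInter (PySem.List.pyGetD cycles v (0,0,0)) (PySem.List.pyGetD cycles u (0,0,0))

-- shared helper: the stack-based component search (identical loop in A and B). visited is the set of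
-- visited indices; neighbours are scanned in index order (Python iterates a set of small ints; the order
-- inside a component does not affect either program's returned value). fuel = nc+2 bounds the
-- iterations of the while loop (pops ≤ pushes + 1 ≤ nc + 1), so it is never exhausted.
def pvCompLoop (adj : Int → Int → Bool) (nc : Int) :
    Nat → PySem.Set Int → List Int → List Int → PySem.Set Int × List Int
  | 0, visited, _, comp => (visited, comp)
  | _ + 1, visited, [], comp => (visited, comp)
  | fuel + 1, visited, v :: stack, comp =>
    let st := (PySem.List.pyRange 0 nc 1).foldl
      (fun (st : PySem.Set Int × List Int) u =>
        if adj v u && !(PySem.Set.contains st.1 u) then (PySem.Set.add st.1 u, u :: st.2) else st)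
      (visited, stack)
    pvCompLoop adj nc fuel st.1 st.2 (comp ++ [v])

def pvComponents (adj : Int → Int → Bool) (nc : Int) : List (List Int) :=
  ((PySem.List.pyRange 0 nc 1).foldl
    (fun (st : PySem.Set Int × List (List Int)) start =>
      if PySem.Set.contains st.1 start then st
      else
        (let r := pvCompLoop adj nc (nc.toNat + 2) (PySem.Set.add st.1 start) [start] []
         (r.1, st.2 ++ [r.2])))
    (PySem.Set.empty, [])).2

-- A's entry of the adjacency matrix A[x][y] (indices always in range where A reads them)
def pvMatGet (M : List (List Int)) (x y : Int) : Int :=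
  PySem.List.pyGetD (PySem.List.pyGetD M x []) y 0

-- A's matrix build: rows of zeros, then one cell set to 1 per edge according to the orientation bit
def pvMatA (n bits : Int) : List (List Int) :=
  (PySem.List.enumerate (pvEdges n)).foldl
    (fun M ke =>
      if (PySem.Int.band bits ((1:Int) <<< ke.1.toNat) != 0) then
        PySem.List.pySetD M ke.2.2 (PySem.List.pySetD (PySem.List.pyGetD M ke.2.2 []) ke.2.1 1)
      else
        PySem.List.pySetD M ke.2.1 (PySem.List.pySetD (PySem.List.pyGetD M ke.2.1 []) ke.2.2 1))
    ((PySem.List.pyRange 0 n 1).map (fun _ => List.replicate n.toNat 0))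

-- A's triple loop collecting cyclically oriented triangles, reading the matrix
def pvCyclesA (n bits : Int) : List (Int × Int × Int) :=
  (PySem.List.pyRange 0 n 1).flatMap (fun a =>
    (PySem.List.pyRange (a+1) n 1).flatMap (fun b =>
      ((PySem.List.pyRange (b+1) n 1).filter (fun c =>
        ((pvMatGet (pvMatA n bits) a b != 0) && (pvMatGet (pvMatA n bits) b c != 0) &&
          (pvMatGet (pvMatA n bits) c a != 0)) ||
        ((pvMatGet (pvMatA n bits) a c != 0) && (pvMatGet (pvMatA n bits) c b != 0) &&
          (pvMatGet (pvMatA n bits) b a != 0)))).map (fun c => (a, b, c))))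

-- A's all-pairs independence test: the nested loops with early break compute exactly this conjunction
def pvIndepChk (adj : Int → Int → Bool) : List Int → Bool
  | [] => true
  | x :: xs => xs.all (fun y => !(adj x y)) && pvIndepChk adj xs

-- A's brute-force independence sum over all 2^sz subset masks; bin(mask).count('1') is bitCount
def pvIvalBrute (adj : Int → Int → Bool) (comp : List Int) : Int :=
  (PySem.List.pyRange 0 ((1:Int) <<< (PySem.List.len comp).toNat) 1).foldl
    (fun acc mask =>
      if pvIndepChk adj (((PySem.List.pyRange 0 (PySem.List.len comp) 1).filter
            (fun i => (PySem.Int.band mask ((1:Int) <<< i.toNat) != 0))).map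
          (fun i => PySem.List.pyGetD comp i 0))
      then acc + (2:Int) ^ (PySem.Int.bitCount mask) else acc)
    0

def exhaustive_component_check (n : Int) : List Int :=
  PySem.List.sorted
    ((PySem.List.pyRange 0 ((1:Int) <<< (PySem.List.len (pvEdges n)).toNat) 1).foldl
      (fun (vals : PySem.Set Int) bits =>
        if (pvCyclesA n bits).isEmpty then vals
        else
          (pvComponents (pvOmegaAdj (pvCyclesA n bits)) (PySem.List.len (pvCyclesA n bits))).foldl
            (fun vals comp => PySem.Set.add vals (pvIvalBrute (pvOmegaAdj (pvCyclesA n bits)) comp)) vals)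
      PySem.Set.empty)
    (fun x => x)

-- ===== PORT B =====
-- B's orientation store: the set of directed arcs (one per edge)
def pvArcs (n bits : Int) : PySem.Set (Int × Int) :=
  (PySem.List.enumerate (pvEdges n)).foldl
    (fun s ke =>
      if (PySem.Int.band bits ((1:Int) <<< ke.1.toNat) != 0) then PySem.Set.add s (ke.2.2, ke.2.1)
      else PySem.Set.add s (ke.2.1, ke.2.2))
    PySem.Set.empty

-- B's triangle scan: membership tests in the arc set, no matrix
def pvCyclesB (n bits : Int) : List (Int × Int × Int) :=
  (PySem.List.pyRange 0 n 1).flatMap (fun a =>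
    (PySem.List.pyRange (a+1) n 1).flatMap (fun b =>
      ((PySem.List.pyRange (b+1) n 1).filter (fun c =>
        (PySem.Set.contains (pvArcs n bits) (a, b) && PySem.Set.contains (pvArcs n bits) (b, c) &&
          PySem.Set.contains (pvArcs n bits) (c, a)) ||
        (PySem.Set.contains (pvArcs n bits) (a, c) && PySem.Set.contains (pvArcs n bits) (c, b) &&
          PySem.Set.contains (pvArcs n bits) (b, a)))).map (fun c => (a, b, c))))

-- B's deletion–contraction recursion for the independence polynomial at x = 2
def pvInd (adj : Int → Int → Bool) : List Int → Int
  | [] => 1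
  | v :: rest => pvInd adj rest + 2 * pvInd adj (rest.filter (fun u => !(adj v u)))
  termination_by l => l.length
  decreasing_by
  · simp
  · simp only [List.length_cons, List.length_unattach]
    exact Nat.lt_succ_of_le (le_trans (List.length_filter_le _ _) (by simp))

def exhaustive_component_check_alt (n : Int) : List Int :=
  PySem.List.sorted
    (PySem.Set.ofList
      ((PySem.List.pyRange 0 ((1:Int) <<< (PySem.List.len (pvEdges n)).toNat) 1).foldl
        (fun (vals : List Int) bits =>
          if (pvCyclesB n bits).isEmpty then vals
          else
            (pvComponents (pvOmegaAdj (pvCyclesB n bits)) (PySem.List.len (pvCyclesB n bits))).foldl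
              (fun vals comp => vals ++ [pvInd (pvOmegaAdj (pvCyclesB n bits)) comp]) vals)
        []))
    (fun x => x)

-- ===== PRECONDITION & SPEC =====
def Spec_exhaustive_component_check (n : Int) (out : List Int) : Prop := out = exhaustive_component_check_alt n
instance (n : Int) (out : List Int) : Decidable (Spec_exhaustive_component_check n out) := by unfold Spec_exhaustive_component_check; infer_instance

-- ===== CLAIM (what is proved, stated in full; the proofs are below) =====
def Claim_equal_exhaustive_component_check : Prop := ∀ (n : Int), Dom_exhaustive_component_check n → Spec_exhaustive_component_check n (exhaustive_component_check n)

-- ===== LEMMAS AND PROOFS =====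

lemma pv_shl_one (t : Nat) : (1:Int) <<< t = ((2^t : Nat) : Int) := by
  rw [Int.shiftLeft_eq, one_mul]; push_cast; ring

lemma pv_getD_const {α : Type} (l : List α) (d : α) (h : ∀ z ∈ l, z = d) (i : Int) :
    PySem.List.pyGetD l i d = d := by
  by_cases hr : PySem.Raise.InRange l.length i
  · exact h _ (PySem.List.pyGetD_mem _ _ hr)
  · exact PySem.List.pyGetD_of_none _ _ _ ((PySem.List.pyGet?_eq_none_iff _ _).2 hr)

lemma pv_matget_zero (n : Int) (x y : Int) :
    pvMatGet ((PySem.List.pyRange 0 n 1).map (fun _ => List.replicate n.toNat 0)) x y = 0 := by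
  unfold pvMatGet
  have hrow : PySem.List.pyGetD ((PySem.List.pyRange 0 n 1).map
        (fun _ => List.replicate n.toNat (0:Int))) x [] = List.replicate n.toNat (0:Int) ∨
      PySem.List.pyGetD ((PySem.List.pyRange 0 n 1).map
        (fun _ => List.replicate n.toNat (0:Int))) x [] = [] := by
    by_cases hr : PySem.Raise.InRange ((PySem.List.pyRange 0 n 1).map
        (fun _ => List.replicate n.toNat (0:Int))).length x
    · left
      have hm := PySem.List.pyGetD_mem _ ([] : List Int) hr
      rcases List.mem_map.1 hm with ⟨a, -, h2⟩
      exact h2.symm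
    · right
      exact PySem.List.pyGetD_of_none _ _ _ ((PySem.List.pyGet?_eq_none_iff _ _).2 hr)
  rcases hrow with h | h <;> rw [h]
  · exact pv_getD_const _ _ (fun z hz => List.eq_of_mem_replicate hz) y
  · exact pv_getD_const _ _ (fun z hz => absurd hz (by simp)) y

lemma pv_getD_set_int {α : Type} (xs : List α) (jn : Nat) (hj : jn < xs.length) (v d : α)
    (x : Int) (hx : 0 ≤ x) :
    PySem.List.pyGetD (PySem.List.pySetD xs ((jn : Nat) : Int) v) x d =
      if x = ((jn : Nat) : Int) then v else PySem.List.pyGetD xs x d := by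
  obtain ⟨xn, rfl⟩ := Int.eq_ofNat_of_zero_le hx
  rw [PySem.List.pySetD_natCast, PySem.List.pyGetD_natCast, PySem.List.pyGetD_natCast,
    List.getD_eq_getElem?_getD, List.getD_eq_getElem?_getD, List.getElem?_set]
  by_cases hxy : xn = jn
  · subst hxy; simp [hj]
  · have hne : ¬ ((xn : Int) = (jn : Int)) := by exact_mod_cast hxy
    rw [if_neg (Ne.symm hxy), if_neg hne]

lemma pv_matget_set (M : List (List Int)) (nn : Nat) (hM : M.length = nn)
    (hrows : ∀ row ∈ M, row.length = nn) (r c : Int) (hr0 : 0 ≤ r) (hrn : r < (nn : Int))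
    (hc0 : 0 ≤ c) (hcn : c < (nn : Int)) :
    (∀ x y : Int, 0 ≤ x → 0 ≤ y →
      pvMatGet (PySem.List.pySetD M r (PySem.List.pySetD (PySem.List.pyGetD M r []) c 1)) x y =
        if x = r ∧ y = c then 1 else pvMatGet M x y) ∧
    (PySem.List.pySetD M r (PySem.List.pySetD (PySem.List.pyGetD M r []) c 1)).length = nn ∧
    (∀ row ∈ PySem.List.pySetD M r (PySem.List.pySetD (PySem.List.pyGetD M r []) c 1),
      row.length = nn) := by
  obtain ⟨rn, rfl⟩ := Int.eq_ofNat_of_zero_le hr0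
  obtain ⟨cn, rfl⟩ := Int.eq_ofNat_of_zero_le hc0
  have hrlen : rn < M.length := by rw [hM]; exact_mod_cast hrn
  have hrowval : PySem.List.pyGetD M ((rn : Nat) : Int) [] = M[rn] := by
    rw [PySem.List.pyGetD_natCast, List.getD_eq_getElem?_getD, List.getElem?_eq_getElem hrlen]
    rfl
  have hrowlen : M[rn].length = nn := hrows _ (List.getElem_mem hrlen)
  have hclen : cn < (PySem.List.pyGetD M ((rn : Nat) : Int) []).length := by
    rw [hrowval, hrowlen]; exact_mod_cast hcn
  refine ⟨?_, ?_, ?_⟩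
  · intro x y hx hy
    unfold pvMatGet
    rw [pv_getD_set_int M rn hrlen _ [] x hx]
    by_cases hxr : x = ((rn : Nat) : Int)
    · rw [if_pos hxr]
      rw [pv_getD_set_int _ cn hclen 1 0 y hy]
      by_cases hyc : y = ((cn : Nat) : Int)
      · rw [if_pos hyc, if_pos ⟨hxr, hyc⟩]
      · rw [if_neg hyc, if_neg (fun h => hyc h.2), hxr]
    · rw [if_neg hxr, if_neg (fun h => hxr h.1)]
  · rw [PySem.List.length_pySetD, hM]
  · intro row hrow
    rw [PySem.List.pySetD_natCast] at hrow
    rcases List.mem_or_eq_of_mem_set hrow with h | h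
    · exact hrows _ h
    · rw [h, PySem.List.length_pySetD, hrowval, hrowlen]

lemma pv_inv_step (n : Int) (M : List (List Int)) (s : PySem.Set (Int × Int))
    (hM : M.length = n.toNat) (hrows : ∀ row ∈ M, row.length = n.toNat)
    (hinv : ∀ x y : Int, 0 ≤ x → 0 ≤ y → ((pvMatGet M x y != 0) = PySem.Set.contains s (x, y)))
    (r c : Int) (hr0 : 0 ≤ r) (hrn : r < n) (hc0 : 0 ≤ c) (hcn : c < n) :
    (PySem.List.pySetD M r (PySem.List.pySetD (PySem.List.pyGetD M r []) c 1)).length = n.toNat ∧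
    (∀ row ∈ PySem.List.pySetD M r (PySem.List.pySetD (PySem.List.pyGetD M r []) c 1),
      row.length = n.toNat) ∧
    (∀ x y : Int, 0 ≤ x → 0 ≤ y →
      ((pvMatGet (PySem.List.pySetD M r (PySem.List.pySetD (PySem.List.pyGetD M r []) c 1)) x y != 0)
        = PySem.Set.contains (PySem.Set.add s (r, c)) (x, y))) := by
  have hn : ((n.toNat : Nat) : Int) = n := Int.toNat_of_nonneg (le_trans hr0 (le_of_lt hrn))
  obtain ⟨hget, hlen, hrows'⟩ :=
    pv_matget_set M n.toNat hM hrows r c hr0 (by rw [hn]; exact hrn) hc0 (by rw [hn]; exact hcn)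
  refine ⟨hlen, hrows', ?_⟩
  intro x y hx hy
  rw [hget x y hx hy, Bool.eq_iff_iff]
  constructor
  · intro h
    rw [PySem.Set.contains_iff, PySem.Set.mem_add]
    by_cases hcond : x = r ∧ y = c
    · right; rw [hcond.1, hcond.2]
    · left
      rw [if_neg hcond] at h
      rw [← PySem.Set.contains_iff, ← hinv x y hx hy]
      exact h
  · intro h
    rw [PySem.Set.contains_iff, PySem.Set.mem_add] at h
    by_cases hcond : x = r ∧ y = c
    · rw [if_pos hcond]; decide
    · rw [if_neg hcond]
      rcases h with h | h
      · rw [hinv x y hx hy, PySem.Set.contains_iff]; exact h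
      · exact absurd ⟨congrArg Prod.fst h, congrArg Prod.snd h⟩ hcond

lemma pv_mat_arcs_inv (n bits : Int) :
    ∀ (l : List (Int × Int × Int)),
    (∀ e ∈ l, 0 ≤ e.2.1 ∧ e.2.1 < e.2.2 ∧ e.2.2 < n) →
    ∀ (M : List (List Int)) (s : PySem.Set (Int × Int)),
    M.length = n.toNat →
    (∀ row ∈ M, row.length = n.toNat) →
    (∀ x y : Int, 0 ≤ x → 0 ≤ y → ((pvMatGet M x y != 0) = PySem.Set.contains s (x, y))) →
    ∀ x y : Int, 0 ≤ x → 0 ≤ y →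
      ((pvMatGet (l.foldl
          (fun M ke =>
            if (PySem.Int.band bits ((1:Int) <<< ke.1.toNat) != 0) then
              PySem.List.pySetD M ke.2.2 (PySem.List.pySetD (PySem.List.pyGetD M ke.2.2 []) ke.2.1 1)
            else
              PySem.List.pySetD M ke.2.1 (PySem.List.pySetD (PySem.List.pyGetD M ke.2.1 []) ke.2.2 1))
          M) x y != 0)
        = PySem.Set.contains (l.foldl
          (fun s ke =>
            if (PySem.Int.band bits ((1:Int) <<< ke.1.toNat) != 0) then PySem.Set.add s (ke.2.2, ke.2.1)
            else PySem.Set.add s (ke.2.1, ke.2.2))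
          s) (x, y)) := by
  intro l
  induction l with
  | nil => intro _ M s _ _ hinv x y hx hy; exact hinv x y hx hy
  | cons e l ih =>
    intro hl M s hM hrows hinv x y hx hy
    obtain ⟨hi0, hij, hjn⟩ := hl e List.mem_cons_self
    have hj0 : 0 ≤ e.2.2 := le_trans hi0 (le_of_lt hij)
    have hin : e.2.1 < n := lt_trans hij hjn
    have hl' : ∀ e' ∈ l, 0 ≤ e'.2.1 ∧ e'.2.1 < e'.2.2 ∧ e'.2.2 < n :=
      fun e' h => hl e' (List.mem_cons_of_mem _ h)
    simp only [List.foldl_cons]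
    by_cases hbit : (PySem.Int.band bits ((1:Int) <<< ((e.1.toNat : Nat) : Int)) != 0) = true
    · rw [if_pos hbit, if_pos hbit]
      obtain ⟨hlen, hrows', hinv'⟩ := pv_inv_step n M s hM hrows hinv e.2.2 e.2.1 hj0 hjn hi0 hin
      exact ih hl' _ _ hlen hrows' hinv' x y hx hy
    · rw [if_neg hbit, if_neg hbit]
      obtain ⟨hlen, hrows', hinv'⟩ := pv_inv_step n M s hM hrows hinv e.2.1 e.2.2 hi0 hin hj0 hjn
      exact ih hl' _ _ hlen hrows' hinv' x y hx hy

lemma pv_edges_mem (n : Int) : ∀ e ∈ pvEdges n, 0 ≤ e.1 ∧ e.1 < e.2 ∧ e.2 < n := by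
  intro e he
  simp only [pvEdges, List.mem_flatMap, List.mem_map] at he
  obtain ⟨i, hi, j, hj, rfl⟩ := he
  rw [PySem.List.mem_pyRange_one] at hi hj
  exact ⟨hi.1, by omega, hj.2⟩

lemma pv_matget_contains (n bits : Int) (x y : Int) (hx : 0 ≤ x) (hy : 0 ≤ y) :
    (pvMatGet (pvMatA n bits) x y != 0) = PySem.Set.contains (pvArcs n bits) (x, y) := by
  unfold pvMatA pvArcs
  refine pv_mat_arcs_inv n bits _ ?_ _ _ ?_ ?_ ?_ x y hx hy
  · intro e he
    rw [PySem.List.mem_enumerate_iff] at he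
    obtain ⟨k, hk, rfl⟩ := he
    have hb := pv_edges_mem n _ (List.getElem_mem hk)
    simpa using hb
  · simp
  · intro row hrow
    rcases List.mem_map.1 hrow with ⟨a, -, rfl⟩
    simp
  · intro x' y' _ _
    rw [pv_matget_zero]
    rfl

lemma pv_cycles_eq (n bits : Int) : pvCyclesA n bits = pvCyclesB n bits := by
  unfold pvCyclesA pvCyclesB
  rw [List.flatMap_def, List.flatMap_def]
  congr 1
  apply List.map_congr_left
  intro a ha
  rw [List.flatMap_def, List.flatMap_def]
  congr 1
  apply List.map_congr_left
  intro b hb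
  congr 1
  apply List.filter_congr
  intro c hc
  rw [PySem.List.mem_pyRange_one] at ha hb hc
  have ha0 : (0:Int) ≤ a := ha.1
  have hb0 : (0:Int) ≤ b := by omega
  have hc0 : (0:Int) ≤ c := by omega
  rw [pv_matget_contains n bits a b ha0 hb0, pv_matget_contains n bits b c hb0 hc0,
    pv_matget_contains n bits c a hc0 ha0, pv_matget_contains n bits a c ha0 hc0,
    pv_matget_contains n bits c b hc0 hb0, pv_matget_contains n bits b a hb0 ha0]

-- ===== the independence-sum ↔ deletion–contraction bridge =====

-- popcount of a Nat mask, as A's bin(mask).count('1')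
def pvPc (k : Nat) : Nat := PySem.Int.bitCount (k : Int)

-- the sublist of L selected by the bits of the mask k (bit 0 ↔ head)
def pvSel (L : List Int) (k : Nat) : List Int :=
  ((List.range L.length).filter (fun j => k.testBit j)).map (fun j => L.getD j 0)

-- the masked sum restricted by an extra vertex predicate p
def pvG (adj : Int → Int → Bool) (p : Int → Bool) (L : List Int) : Int :=
  ((List.range (2 ^ L.length)).map (fun k =>
    if (pvSel L k).all p && pvIndepChk adj (pvSel L k) then (2:Int) ^ (pvPc k) else 0)).sum

lemma pv_pc_zero : pvPc 0 = 0 := by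
  simp [pvPc]

lemma pv_pc_two_mul (q : Nat) : pvPc (2 * q) = pvPc q := by
  rcases Nat.eq_zero_or_pos q with h | h
  · simp [h, pv_pc_zero]
  · have hb := PySem.Int.bitCount_natCast (m := 2 * q) (by omega)
    have h1 : 2 * q % 2 = 0 := by omega
    have h2 : 2 * q / 2 = q := by omega
    simp only [pvPc, hb, h1, h2, Nat.zero_add]

lemma pv_pc_two_mul_add_one (q : Nat) : pvPc (2 * q + 1) = pvPc q + 1 := by
  have hb := PySem.Int.bitCount_natCast (m := 2 * q + 1) (by omega)
  have h1 : (2 * q + 1) % 2 = 1 := by omega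
  have h2 : (2 * q + 1) / 2 = q := by omega
  simp only [pvPc, hb, h1, h2]
  omega

lemma pv_sel_zero (L : List Int) : pvSel L 0 = [] := by
  simp [pvSel, Nat.zero_testBit]

lemma pv_sel_cons (v : Int) (rest : List Int) (k : Nat) :
    pvSel (v :: rest) k =
      (if k.testBit 0 then v :: pvSel rest (k / 2) else pvSel rest (k / 2)) := by
  unfold pvSel
  rw [show (v :: rest).length = rest.length + 1 from rfl, List.range_succ_eq_map,
    List.filter_cons, List.filter_map]
  have hcomp : ((fun j => k.testBit j) ∘ Nat.succ) = fun j => (k / 2).testBit j := by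
    funext j
    simp only [Function.comp]
    exact Nat.testBit_succ k j
  rw [hcomp]
  cases h : k.testBit 0 <;> simp [List.map_map, Function.comp]

lemma pv_all_and (l : List Int) (p q : Int → Bool) :
    (l.all (fun x => p x && q x)) = (l.all p && l.all q) := by
  induction l with
  | nil => rfl
  | cons a l ih =>
    simp only [List.all_cons, ih]
    cases p a <;> cases q a <;> simp

lemma pv_sum_range_two_mul (m : Nat) (f : Nat → Int) :
    ((List.range (2*m)).map f).sum = ((List.range m).map (fun q => f (2*q) + f (2*q+1))).sum := by
  induction m with
  | zero => rfl
  | succ m ih =>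
    have h2 : 2 * (m + 1) = (2*m + 1) + 1 := by ring
    rw [h2, List.range_succ, List.range_succ, List.range_succ]
    simp only [List.map_append, List.sum_append, ih]
    simp
    ring

lemma pv_sum_range_two_mul' (m : Nat) (f g h : Nat → Int)
    (hpt : ∀ q, f (2*q) + f (2*q+1) = g q + h q) :
    ((List.range (2*m)).map f).sum =
      ((List.range m).map g).sum + ((List.range m).map h).sum := by
  rw [pv_sum_range_two_mul]
  simp only [hpt]
  exact PySem.List.sum_map_add_int _ g h

lemma pv_G_nil (adj : Int → Int → Bool) (p : Int → Bool) : pvG adj p [] = 1 := by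
  simp [pvG, pv_sel_zero, pv_pc_zero, pvIndepChk]

lemma pv_G_cons (adj : Int → Int → Bool) (p : Int → Bool) (v : Int) (rest : List Int) :
    pvG adj p (v :: rest) =
      pvG adj p rest +
        (if p v then 2 * pvG adj (fun x => p x && !(adj v x)) rest else 0) := by
  have hpt : ∀ q : Nat,
      (fun k => if (pvSel (v :: rest) k).all p && pvIndepChk adj (pvSel (v :: rest) k)
          then (2:Int) ^ (pvPc k) else 0) (2*q) +
      (fun k => if (pvSel (v :: rest) k).all p && pvIndepChk adj (pvSel (v :: rest) k)
          then (2:Int) ^ (pvPc k) else 0) (2*q+1)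
      = (fun q => if (pvSel rest q).all p && pvIndepChk adj (pvSel rest q)
          then (2:Int) ^ (pvPc q) else 0) q +
        (fun q => if p v then
            2 * (if (pvSel rest q).all (fun x => p x && !(adj v x)) && pvIndepChk adj (pvSel rest q)
              then (2:Int) ^ (pvPc q) else 0)
          else 0) q := by
    intro q
    have h20 : (2*q).testBit 0 = false := by
      rw [Nat.testBit_zero]
      simp only [decide_eq_false_iff_not]
      omega
    have h21 : (2*q+1).testBit 0 = true := by
      rw [Nat.testBit_zero]
      simp only [decide_eq_true_eq]
      omega
    have hd0 : 2*q/2 = q := by omega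
    have hd1 : (2*q+1)/2 = q := by omega
    have he : pvSel (v :: rest) (2*q) = pvSel rest q := by
      rw [pv_sel_cons, h20, hd0]; simp
    have ho : pvSel (v :: rest) (2*q+1) = v :: pvSel rest q := by
      rw [pv_sel_cons, h21, hd1]; simp
    simp only [he, ho, pv_pc_two_mul, pv_pc_two_mul_add_one]
    cases hpv : p v
    · simp [List.all_cons, hpv, pvIndepChk]
    · simp only [List.all_cons, hpv, Bool.true_and, pvIndepChk, pow_succ, if_true]
      congr 1
      rw [pv_all_and]
      cases (pvSel rest q).all p <;> cases (pvSel rest q).all (fun y => !(adj v y)) <;>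
        cases pvIndepChk adj (pvSel rest q) <;> simp <;> ring
  unfold pvG
  rw [show (v :: rest).length = rest.length + 1 from rfl, pow_succ,
    mul_comm ((2:Nat) ^ rest.length) 2, pv_sum_range_two_mul' _ _ _ _ hpt]
  congr 1
  cases hpv : p v
  · simp
  · simp only [if_true]
    rw [List.sum_map_mul_left]

lemma pv_G_filter (adj : Int → Int → Bool) :
    ∀ (L : List Int) (p q : Int → Bool),
      pvG adj (fun x => p x && q x) L = pvG adj q (L.filter p) := by
  intro L
  induction L with
  | nil => intro p q; simp [pv_G_nil]
  | cons u L ih =>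
    intro p q
    rw [pv_G_cons, List.filter_cons]
    cases hpu : p u
    · simp only [Bool.false_and, Bool.false_eq_true, if_false, add_zero]
      exact ih p q
    · simp only [Bool.true_and, if_true]
      rw [pv_G_cons]
      have e1 : (fun x => (p x && q x) && !(adj u x)) = (fun x => p x && (q x && !(adj u x))) :=
        funext (fun x => by cases p x <;> cases q x <;> simp)
      rw [e1, ih p q, ih p (fun x => q x && !(adj u x))]

theorem pv_G_true_eq_ind (adj : Int → Int → Bool) :
    ∀ L : List Int, pvG adj (fun _ => true) L = pvInd adj L
  | [] => by rw [pv_G_nil, pvInd]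
  | v :: rest => by
    rw [pv_G_cons]
    have e1 : (fun x => (fun _ => true) x && !(adj v x)) =
        (fun x => !(adj v x) && (fun _ => true) x) :=
      funext (fun x => by cases adj v x <;> simp)
    rw [e1, pv_G_filter adj rest, pv_G_true_eq_ind adj rest,
      pv_G_true_eq_ind adj (rest.filter (fun u => !(adj v u)))]
    conv_rhs => rw [pvInd]
    simp
  termination_by L => L.length
  decreasing_by
  · simp
  · simp only [List.length_cons]
    exact Nat.lt_succ_of_le (List.length_filter_le _ _)

lemma pv_shl_one' (t : Nat) : (1:Int) <<< ((t : Nat) : Int) = ((2^t : Nat) : Int) := by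
  simpa [Nat.one_shiftLeft] using Int.shiftLeft_natCast 1 t

lemma pv_band_pow (k t : Nat) :
    ((PySem.Int.band (k : Int) ((1:Int) <<< ((t : Nat) : Int))) != 0) = k.testBit t := by
  rw [pv_shl_one', PySem.Int.band_natCast]
  cases h : k.testBit t
  · simp [Nat.and_two_pow, h]
  · simp [Nat.and_two_pow, h]

lemma pv_nodes_eq (comp : List Int) (k : Nat) :
    ((PySem.List.pyRange 0 (PySem.List.len comp) 1).filter
        (fun i => (PySem.Int.band ((k:Nat) : Int) ((1:Int) <<< ((i.toNat : Nat) : Int)) != 0))).map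
      (fun i => PySem.List.pyGetD comp i 0) = pvSel comp k := by
  rw [PySem.List.len_eq, PySem.List.pyRange_one]
  rw [show (((comp.length : Nat) : Int) - 0).toNat = comp.length by
    rw [sub_zero, Int.toNat_natCast]]
  simp only [zero_add]
  rw [List.filter_map]
  have h2 : ((fun i => (PySem.Int.band ((k:Nat) : Int) ((1:Int) <<< ((i.toNat : Nat) : Int)) != 0)) ∘
      (fun j : Nat => (j : Int))) = fun j => k.testBit j := by
    funext j
    simp only [Function.comp, Int.toNat_natCast]
    exact pv_band_pow k j
  rw [h2, List.map_map]
  have h3 : ((fun i => PySem.List.pyGetD comp i 0) ∘ (fun j : Nat => (j : Int))) =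
      fun j => comp.getD j 0 := by
    funext j
    simp [Function.comp]
  rw [h3]
  rfl

lemma pv_ival_eq_G (adj : Int → Int → Bool) (comp : List Int) :
    pvIvalBrute adj comp = pvG adj (fun _ => true) comp := by
  unfold pvIvalBrute
  have hout : PySem.List.pyRange 0 ((1:Int) <<< (PySem.List.len comp).toNat) 1 =
      (List.range (2 ^ comp.length)).map (fun k : Nat => ((k : Nat) : Int)) := by
    rw [show (PySem.List.len comp).toNat = comp.length by simp]
    rw [pv_shl_one, PySem.List.pyRange_one]
    rw [show (((2 ^ comp.length : Nat) : Int) - 0).toNat = 2 ^ comp.length by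
      rw [sub_zero, Int.toNat_natCast]]
    exact List.map_congr_left (fun a _ => by simp)
  rw [hout, List.foldl_map]
  have hbody : (fun (acc : Int) (k : Nat) =>
      if pvIndepChk adj
          (((PySem.List.pyRange 0 (PySem.List.len comp) 1).filter
              (fun i => (PySem.Int.band ((k:Nat) : Int) ((1:Int) <<< ((i.toNat : Nat) : Int)) != 0))).map
            (fun i => PySem.List.pyGetD comp i 0))
      then acc + (2:Int) ^ (PySem.Int.bitCount ((k:Nat) : Int)) else acc)
      = (fun (acc : Int) (k : Nat) =>
          acc + (if pvIndepChk adj (pvSel comp k) then (2:Int) ^ (pvPc k) else 0)) := by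
    funext acc k
    rw [pv_nodes_eq comp k]
    rw [show PySem.Int.bitCount ((k : Nat) : Int) = pvPc k from rfl]
    split_ifs <;> simp
  rw [hbody, PySem.List.foldl_add, zero_add]
  unfold pvG
  apply congrArg
  apply List.map_congr_left
  intro k _
  simp

lemma pv_ival_eq_ind (adj : Int → Int → Bool) (comp : List Int) :
    pvIvalBrute adj comp = pvInd adj comp := by
  rw [pv_ival_eq_G, pv_G_true_eq_ind]

lemma pv_inner (adj : Int → Int → Bool) :
    ∀ (comps : List (List Int)) (vA : PySem.Set Int) (vB : List Int), vA = PySem.Set.ofList vB →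
      comps.foldl (fun vals comp => PySem.Set.add vals (pvIvalBrute adj comp)) vA =
        PySem.Set.ofList (comps.foldl (fun vals comp => vals ++ [pvInd adj comp]) vB) := by
  intro comps
  induction comps with
  | nil => intro vA vB h; exact h
  | cons c comps ih =>
    intro vA vB h
    simp only [List.foldl_cons]
    exact ih _ _ (by rw [h, pv_ival_eq_ind, PySem.Set.ofList_append_singleton])

lemma pv_outer (n : Int) :
    ∀ (bl : List Int) (vA : PySem.Set Int) (vB : List Int), vA = PySem.Set.ofList vB →
      bl.foldl (fun vals bits =>
          if (pvCyclesA n bits).isEmpty then vals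
          else
            (pvComponents (pvOmegaAdj (pvCyclesA n bits)) (PySem.List.len (pvCyclesA n bits))).foldl
              (fun vals comp => PySem.Set.add vals (pvIvalBrute (pvOmegaAdj (pvCyclesA n bits)) comp)) vals) vA
      = PySem.Set.ofList (bl.foldl (fun vals bits =>
          if (pvCyclesB n bits).isEmpty then vals
          else
            (pvComponents (pvOmegaAdj (pvCyclesB n bits)) (PySem.List.len (pvCyclesB n bits))).foldl
              (fun vals comp => vals ++ [pvInd (pvOmegaAdj (pvCyclesB n bits)) comp]) vals) vB) := by
  intro bl
  induction bl with
  | nil => intro vA vB h; exact h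
  | cons bits bl ih =>
    intro vA vB h
    simp only [List.foldl_cons]
    apply ih
    rw [← pv_cycles_eq n bits]
    by_cases hc : (pvCyclesA n bits).isEmpty
    · simp [hc, h]
    · simp only [hc, Bool.false_eq_true, if_false]
      exact pv_inner _ _ _ _ h

-- ===== VERDICT (by name: the statement is the Claim_ definition above) =====
theorem exhaustive_component_check_spec : Claim_equal_exhaustive_component_check := by
  intro n _
  unfold Spec_exhaustive_component_check
  unfold exhaustive_component_check exhaustive_component_check_alt
  rw [pv_outer n _ PySem.Set.empty [] rfl]
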